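-- pv_equiv track=rewrite | github.com/Blockbastermaker/kissim | kinsim_structure/encoding.py | from_residue
-- ===== SOURCE A (Python) =====
-- FEATURE_LOOKUP = {
--     'size': {
--         1: 'ALA CYS GLY PRO SER THR VAL'.split(),
--         2: 'ASN ASP GLN GLU HIS ILE LEU LYS MET'.split(),
--         3: 'ARG PHE TRP TYR'.split()
--     },
--     'hbd': {
--         0: 'ALA ASP GLU GLY ILE LEU MET PHE PRO VAL'.split(),
--         1: 'ASN CYS GLN HIS LYS SER THR TRP TYR'.split(),
--         3: 'ARG'.split()
--     },  # Note: it is correct that 2 is missing!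
--     'hba': {
--         0: 'ALA ARG CYS GLY ILE LEU LYS MET PHE PRO TRP VAL'.split(),
--         1: 'ASN GLN HIS SER THR TYR'.split(),
--         2: 'ASP GLU'.split()
--     },
--     'charge': {
--         -1: 'ASP GLU'.split(),
--         0: 'ALA ASN CYS GLN GLY HIS ILE LEU MET PHE PRO SER TRP TYR VAL'.split(),
--         1: 'ARG LYS THR'.split()
--     },
--     'aromatic': {
--         0: 'ALA ARG ASN ASP CYS GLN GLU GLY ILE LEU LYS MET PRO SER THR VAL'.split(),
--         1: 'HIS PHE TRP TYR'.split()
--     },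
--     'aliphatic': {
--         0: 'ARG ASN ASP GLN GLU GLY HIS LYS PHE SER TRP TYR'.split(),
--         1: 'ALA CYS ILE LEU MET PRO THR VAL'.split()
--     }
-- }
--
-- MODIFIED_AA_CONVERSION = {
--     'CAF': 'CYS',
--     'CME': 'CYS',
--     'CSS': 'CYS',
--     'OCY': 'CYS',
--     'KCX': 'LYS',
--     'MSE': 'MET',
--     'PHD': 'ASP',
--     'PTR': 'TYR'
-- }
--
-- def from_residue(residue, feature_type):
--     """
--     Get feature value for residue's size and pharmacophoric features (i.e. number of hydrogen bond donor,
--     hydrogen bond acceptors, charge features, aromatic features or aliphatic features)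
--     (according to SiteAlign feature encoding).
--
--     Parameters
--     ----------
--     residue : str
--         Three-letter code for residue.
--     feature_type : str
--         Feature type name.
--
--     Returns
--     -------
--     int
--         Residue's size value according to SiteAlign feature encoding.
--     """
--
--     if feature_type not in FEATURE_LOOKUP.keys():
--         raise KeyError(f'Feature {feature_type} does not exist. '
--                        f'Please choose from: {", ".join(FEATURE_LOOKUP.keys())}')
--
--     # Manual addition of modified residue(s)
--     if residue in MODIFIED_AA_CONVERSION.keys():
--         residue = MODIFIED_AA_CONVERSION[residue]
--
--     # Start with a feature of None
--     result = None
--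
--     # If residue name is listed in the feature lookup, assign respective feature
--     for feature, residues in FEATURE_LOOKUP[feature_type].items():
--
--         if residue in residues:
--             result = feature
--
--     return result
-- ===== SOURCE B (Python) =====
-- MODIFIED_AA_CONVERSION = {
--     'CAF': 'CYS',
--     'CME': 'CYS',
--     'CSS': 'CYS',
--     'OCY': 'CYS',
--     'KCX': 'LYS',
--     'MSE': 'MET',
--     'PHD': 'ASP',
--     'PTR': 'TYR'
-- }
--
-- # Each residue's six SiteAlign feature values packed into one integer, one decimal
-- # digit per feature (charge stored +1 so it fits in a digit):
-- # digits left-to-right = size, hbd, hba, charge+1, aromatic, aliphatic.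
-- PACKED_PROFILE = {
--     'ALA': 100101, 'ARG': 330200, 'ASN': 211100, 'ASP': 202000,
--     'CYS': 110101, 'GLN': 211100, 'GLU': 202000, 'GLY': 100100,
--     'HIS': 211110, 'ILE': 200101, 'LEU': 200101, 'LYS': 210200,
--     'MET': 200101, 'PHE': 300110, 'PRO': 100101, 'SER': 111100,
--     'THR': 111201, 'TRP': 310110, 'TYR': 311110, 'VAL': 100101
-- }
--
-- # digit position (from the right) of each feature in PACKED_PROFILE
-- FEATURE_POS = {
--     'size': 5, 'hbd': 4, 'hba': 3, 'charge': 2, 'aromatic': 1, 'aliphatic': 0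
-- }
--
--
-- def from_residue(residue, feature_type):
--     """Arithmetic decoding of per-residue packed profiles instead of scanning the
--     feature-major lookup tables."""
--     if feature_type not in FEATURE_POS:
--         raise KeyError(f'Feature {feature_type} does not exist. '
--                        f'Please choose from: {", ".join(FEATURE_POS.keys())}')
--     residue = MODIFIED_AA_CONVERSION.get(residue, residue)
--     code = PACKED_PROFILE.get(residue)
--     if code is None:
--         return None
--     digit = code // 10 ** FEATURE_POS[feature_type] % 10
--     return digit - 1 if feature_type == 'charge' else digit
-- ===== Notes on version B (the rewrite author's own statement) =====
-- stated objective: alternative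
-- what changed: The feature-major table scan (loop over categories, list membership, last-assignment accumulator) is replaced by a transposed residue-major table: each residue's six feature values are packed as decimal digits of one integer, and the requested feature is decoded arithmetically with // 10**pos % 10 (charge stored with a +1 offset).
import Mathlib
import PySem

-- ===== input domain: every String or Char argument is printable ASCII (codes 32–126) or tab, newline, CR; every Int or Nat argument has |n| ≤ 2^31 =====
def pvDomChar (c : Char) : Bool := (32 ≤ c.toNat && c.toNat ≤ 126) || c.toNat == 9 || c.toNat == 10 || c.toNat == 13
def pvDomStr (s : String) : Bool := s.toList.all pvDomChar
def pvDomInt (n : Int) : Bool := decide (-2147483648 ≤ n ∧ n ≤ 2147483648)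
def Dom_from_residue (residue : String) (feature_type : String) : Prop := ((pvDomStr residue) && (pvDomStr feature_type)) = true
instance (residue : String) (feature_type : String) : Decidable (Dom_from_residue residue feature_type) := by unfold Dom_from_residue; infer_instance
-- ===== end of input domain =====

-- B replaces A's loop over feature categories (membership test + last assignment) by a
-- per-residue packed-digit profile table decoded arithmetically (// and % 10); simpler,
-- same results on valid feature types.


-- ===== PORT A =====
-- FEATURE_LOOKUP[feature_type].items(), in insertion order (module constant of A)
def pvFeatureLookup (ft : String) : List (Int × List String) :=
  if ft = "size" then
    [(1, ["ALA","CYS","GLY","PRO","SER","THR","VAL"]),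
     (2, ["ASN","ASP","GLN","GLU","HIS","ILE","LEU","LYS","MET"]),
     (3, ["ARG","PHE","TRP","TYR"])]
  else if ft = "hbd" then
    [(0, ["ALA","ASP","GLU","GLY","ILE","LEU","MET","PHE","PRO","VAL"]),
     (1, ["ASN","CYS","GLN","HIS","LYS","SER","THR","TRP","TYR"]),
     (3, ["ARG"])]
  else if ft = "hba" then
    [(0, ["ALA","ARG","CYS","GLY","ILE","LEU","LYS","MET","PHE","PRO","TRP","VAL"]),
     (1, ["ASN","GLN","HIS","SER","THR","TYR"]),
     (2, ["ASP","GLU"])]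
  else if ft = "charge" then
    [(-1, ["ASP","GLU"]),
     (0, ["ALA","ASN","CYS","GLN","GLY","HIS","ILE","LEU","MET","PHE","PRO","SER","TRP","TYR","VAL"]),
     (1, ["ARG","LYS","THR"])]
  else if ft = "aromatic" then
    [(0, ["ALA","ARG","ASN","ASP","CYS","GLN","GLU","GLY","ILE","LEU","LYS","MET","PRO","SER","THR","VAL"]),
     (1, ["HIS","PHE","TRP","TYR"])]
  else if ft = "aliphatic" then
    [(0, ["ARG","ASN","ASP","GLN","GLU","GLY","HIS","LYS","PHE","SER","TRP","TYR"]),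
     (1, ["ALA","CYS","ILE","LEU","MET","PRO","THR","VAL"])]
  else []

-- MODIFIED_AA_CONVERSION (shared module constant of A and B)
def pvModConv : PySem.Dict String String :=
  PySem.Dict.mk
    [("CAF","CYS"),("CME","CYS"),("CSS","CYS"),("OCY","CYS"),
     ("KCX","LYS"),("MSE","MET"),("PHD","ASP"),("PTR","TYR")]

def from_residue (residue : String) (feature_type : String) : Option Int :=
  -- (KeyError guard on feature_type is excluded by Pre_)
  let residue := if pvModConv.contains residue
                 then (pvModConv.get? residue).getD residue  -- dict[residue]; guard ensures present
                 else residue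
  (pvFeatureLookup feature_type).foldl
    (fun result p => if residue ∈ p.2 then some p.1 else result) none

-- ===== PORT B =====
-- PACKED_PROFILE: one decimal digit per feature, left-to-right size,hbd,hba,charge+1,aromatic,aliphatic
def pvPackedProfile : PySem.Dict String Int :=
  PySem.Dict.mk
    [("ALA", 100101), ("ARG", 330200), ("ASN", 211100), ("ASP", 202000),
     ("CYS", 110101), ("GLN", 211100), ("GLU", 202000), ("GLY", 100100),
     ("HIS", 211110), ("ILE", 200101), ("LEU", 200101), ("LYS", 210200),
     ("MET", 200101), ("PHE", 300110), ("PRO", 100101), ("SER", 111100),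
     ("THR", 111201), ("TRP", 310110), ("TYR", 311110), ("VAL", 100101)]

-- FEATURE_POS: digit position (from the right) of each feature
def pvFeaturePos : PySem.Dict String Int :=
  PySem.Dict.mk
    [("size", 5), ("hbd", 4), ("hba", 3), ("charge", 2), ("aromatic", 1), ("aliphatic", 0)]

def from_residue_alt (residue : String) (feature_type : String) : Option Int :=
  -- (same KeyError guard; excluded by Pre_)
  let residue := (pvModConv.get? residue).getD residue  -- MODIFIED_AA_CONVERSION.get(residue, residue)
  match pvPackedProfile.get? residue with               -- PACKED_PROFILE.get(residue)
  | none => none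
  | some code =>
      -- FEATURE_POS[feature_type]: present by the guard; positions are 0..5 so toNat is exact
      let pos := (pvFeaturePos.get? feature_type).getD 0
      let digit := PySem.Int.mod (PySem.Int.floordiv code (10 ^ pos.toNat)) 10
      some (if feature_type = "charge" then digit - 1 else digit)

-- ===== PRECONDITION & SPEC =====
-- Pre_ excludes exactly the feature types not in FEATURE_LOOKUP, on which both A and B raise KeyError.
def Pre_from_residue (residue : String) (feature_type : String) : Prop :=
  feature_type ∈ ["size","hbd","hba","charge","aromatic","aliphatic"]
instance (residue : String) (feature_type : String) : Decidable (Pre_from_residue residue feature_type) := by unfold Pre_from_residue; infer_instance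
def pvWitness_from_residue : String × String := ("ALA", "size")

def Spec_from_residue (residue : String) (feature_type : String) (out : Option Int) : Prop := out = from_residue_alt residue feature_type
instance (residue : String) (feature_type : String) (out : Option Int) : Decidable (Spec_from_residue residue feature_type out) := by unfold Spec_from_residue; infer_instance

-- ===== CLAIM (what is proved, stated in full; the proofs are below) =====
def Claim_equal_from_residue : Prop := ∀ (residue : String) (feature_type : String), Dom_from_residue residue feature_type → Pre_from_residue residue feature_type → Spec_from_residue residue feature_type (from_residue residue feature_type)

-- ===== LEMMAS AND PROOFS =====

-- the 20 standard residue names: every name appearing in any FEATURE_LOOKUP table (= keys of PACKED_PROFILE)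
def pvAllRes : List String :=
  ["ALA","ARG","ASN","ASP","CYS","GLN","GLU","GLY","HIS","ILE",
   "LEU","LYS","MET","PHE","PRO","SER","THR","TRP","TYR","VAL"]

-- A's accumulator loop returns none when the residue appears in no category's list
lemma fold_none (s : String) (tbl : List (Int × List String)) (h : ∀ p ∈ tbl, s ∉ p.2) :
    tbl.foldl (fun result p => if s ∈ p.2 then some p.1 else result) none = none := by
  induction tbl with
  | nil => rfl
  | cons a tl ih =>
      simp only [List.foldl_cons, if_neg (h a (by simp))]
      exact ih (fun p hp => h p (by simp [hp]))

-- core agreement for each valid feature type, for an arbitrary (already remapped) residue name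
lemma core_eq (ft : String) (hft : ft ∈ ["size","hbd","hba","charge","aromatic","aliphatic"]) (s : String) :
    (pvFeatureLookup ft).foldl (fun result p => if s ∈ p.2 then some p.1 else result) none
      = (match pvPackedProfile.get? s with
         | none => none
         | some code =>
             let pos := (pvFeaturePos.get? ft).getD 0
             let digit := PySem.Int.mod (PySem.Int.floordiv code (10 ^ pos.toNat)) 10
             some (if ft = "charge" then digit - 1 else digit)) := by
  by_cases hs : s ∈ pvAllRes
  · fin_cases hft <;> fin_cases hs <;> decide
  · have hcover : ∀ p ∈ pvFeatureLookup ft, ∀ x ∈ p.2, x ∈ pvAllRes := by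
      fin_cases hft <;> decide
    have hkeys : ∀ x ∈ pvPackedProfile.keys, x ∈ pvAllRes := by decide
    rw [fold_none s _ (fun p hp hm => hs (hcover p hp s hm))]
    have : pvPackedProfile.get? s = none := by
      rw [PySem.Dict.get?_eq_none_iff_not_mem_keys]
      exact fun hk => hs (hkeys s hk)
    rw [this]

lemma remap_eq (r : String) :
    (if pvModConv.contains r then (pvModConv.get? r).getD r else r)
      = (pvModConv.get? r).getD r := by
  by_cases h : pvModConv.contains r
  · simp [h]
  · simp [h]
    cases hg : pvModConv.get? r with
    | none => rfl
    | some v =>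
        exact absurd (by rw [PySem.Dict.contains_eq_isSome_get?, hg]; rfl) h

-- ===== VERDICT (by name: the statement is the Claim_ definition above) =====
theorem from_residue_spec : Claim_equal_from_residue := by
  intro r ft _ hpre
  unfold Spec_from_residue from_residue from_residue_alt
  simp only [remap_eq]
  exact core_eq ft hpre _
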